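-- pv_equiv track=rewrite | github.com/fromjyce/PythonPrograms | DSAPrograms/MaxScoreGCD.py | max_gcd_score
-- ===== SOURCE A (Python) =====
-- import math
--
-- def max_gcd_score(A):
--     N = len(A)
--     A.sort(reverse=True)  # Sort A in descending order to pick the largest element first
--     B = []  # Initialize empty list B
--     score = 0
--
--     # Pick the first element from A and add it to B
--     B.append(A[0])
--     A = A[1:]  # Remove first element from A
--
--     # Max Heap to store potential elements with their best GCD values
--     max_heap = []
--
--     # Process remaining elements
--     while A:
--         best_gcd = 0
--         best_index = -1
--
--         # Find the best element to move to B
--         for i in range(len(A)):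
--             for b in B:
--                 current_gcd = math.gcd(A[i], b)
--                 if current_gcd > best_gcd:
--                     best_gcd = current_gcd
--                     best_index = i
--
--         # Add the best GCD value to score
--         score += best_gcd
--
--         # Move the best element to B
--         B.append(A[best_index])
--         A.pop(best_index)
--
--     return score
-- ===== SOURCE B (Python) =====
-- import math
--
-- def max_gcd_score(A):
--     # Sort in place (same observable mutation as the original), largest first
--     A.sort(reverse=True)
--     rem = A[1:]
--     x = A[0]
--     # best[i] = best gcd of rem[i] against anything already moved to B
--     best = [math.gcd(r, x) for r in rem]
--     score = 0
--     while rem: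
--         g = max(best)
--         j = best.index(g)
--         score += g
--         x = rem.pop(j)
--         best.pop(j)
--         for i in range(len(rem)):
--             b2 = math.gcd(rem[i], x)
--             if b2 > best[i]:
--                 best[i] = b2
--     return score
-- ===== Notes on version B (the rewrite author's own statement) =====
-- stated objective: faster
-- what changed: Instead of rescanning every remaining-element/B-element pair each round (O(N^3) gcds), B keeps a best-gcd-so-far array for the remaining elements and updates it only against the element just moved to B (O(N^2) gcds).
import Mathlib
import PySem

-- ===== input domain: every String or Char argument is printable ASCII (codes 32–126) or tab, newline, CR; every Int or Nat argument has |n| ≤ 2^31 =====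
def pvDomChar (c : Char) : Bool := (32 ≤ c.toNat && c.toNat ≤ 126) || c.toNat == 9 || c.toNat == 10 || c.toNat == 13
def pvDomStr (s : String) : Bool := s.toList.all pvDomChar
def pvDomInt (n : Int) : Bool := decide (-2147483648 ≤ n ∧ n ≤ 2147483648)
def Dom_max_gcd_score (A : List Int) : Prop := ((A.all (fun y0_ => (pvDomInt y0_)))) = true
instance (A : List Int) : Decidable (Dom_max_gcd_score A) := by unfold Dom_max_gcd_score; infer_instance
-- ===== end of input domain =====

-- B replaces A's per-round rescan of all remaining/B pairs by an incrementally maintained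
-- best-gcd array updated only against the newly moved element (measurably faster).
-- Both Pythons sort the argument list in place (the same observable mutation); the
-- equivalence proved here is about the return value.

-- ===== PORT A =====
def pyGcd (a b : Int) : Int := (Int.gcd a b : Int)

def aStep (rem B : List Int) : Int × Int :=
  (List.range rem.length).foldl (fun acc i =>
    B.foldl (fun (acc : Int × Int) b =>
      let g := pyGcd (rem.getD i 0) b
      if acc.1 < g then (g, (i : Int)) else acc) acc) (0, -1)

def aLoop (rem B : List Int) (score : Int) : Int :=
  match rem with
  | [] => score
  | a :: rs =>
    let p := aStep (a :: rs) B
    match hp : PySem.List.pop? (a :: rs) p.2 with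
    | none => score
    | some r => aLoop r.2 (B ++ [r.1]) (score + p.1)
termination_by rem.length
decreasing_by have := PySem.List.length_of_pop?_eq_some _ hp; simp_all

def max_gcd_score (A : List Int) : Int :=
  match PySem.List.sorted A (fun x => x) true with
  | [] => 0   -- unreachable under Pre_: Python raises IndexError on []
  | a0 :: rest => aLoop rest [a0] 0

-- ===== PORT B =====
def bUpdate (rem best : List Int) (x : Int) : List Int :=
  List.zipWith (fun r be => let b2 := pyGcd r x; if be < b2 then b2 else be) rem best

def bLoop (rem best : List Int) (score : Int) : Int :=
  match rem with
  | [] => score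
  | a :: rs =>
    let g := (PySem.List.max? best (fun v => v)).getD 0
    let j := (PySem.List.index? best g).getD 0
    match hp : PySem.List.pop? (a :: rs) (j : Int) with
    | none => score
    | some r =>
      let best' := ((PySem.List.pop? best (j : Int)).map Prod.snd).getD []
      bLoop r.2 (bUpdate r.2 best' r.1) (score + g)
termination_by rem.length
decreasing_by have := PySem.List.length_of_pop?_eq_some _ hp; simp_all

def max_gcd_score_alt (A : List Int) : Int :=
  match PySem.List.sorted A (fun x => x) true with
  | [] => 0   -- unreachable under Pre_
  | x :: rem => bLoop rem (rem.map (fun r => pyGcd r x)) 0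

-- ===== PRECONDITION & SPEC =====
-- Pre_ excludes only the empty list, on which Python A raises IndexError (A[0]).
def Pre_max_gcd_score (A : List Int) : Prop := A ≠ []
instance (A : List Int) : Decidable (Pre_max_gcd_score A) := by unfold Pre_max_gcd_score; infer_instance
def pvWitness_max_gcd_score : List Int := [6, 4, 9]

def Spec_max_gcd_score (A : List Int) (out : Int) : Prop := out = max_gcd_score_alt A
instance (A : List Int) (out : Int) : Decidable (Spec_max_gcd_score A out) := by unfold Spec_max_gcd_score; infer_instance

-- ===== CLAIM (what is proved, stated in full; the proofs are below) =====
def Claim_equal_max_gcd_score : Prop := ∀ (A : List Int), Dom_max_gcd_score A → Pre_max_gcd_score A → Spec_max_gcd_score A (max_gcd_score A)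

-- ===== LEMMAS AND PROOFS =====

-- bestF B a = the best gcd of a against the elements of B (0 if B = []);
-- the loop invariant is that B's maintained array is rem.map (bestF B).
def bestF (B : List Int) (a : Int) : Int := B.foldl (fun m b => max m (pyGcd a b)) 0

theorem pyGcd_nonneg (a b : Int) : 0 ≤ pyGcd a b := Int.natCast_nonneg _

theorem foldl_max_init (f : Int → Int) : ∀ (l : List Int) (c d : Int),
    l.foldl (fun m b => max m (f b)) (max c d) = max c (l.foldl (fun m b => max m (f b)) d) := by
  intro l
  induction l with
  | nil => intro c d; rfl
  | cons b t ih => intro c d; simp only [List.foldl_cons, max_assoc, ih]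

theorem bestF_cons (b : Int) (bs : List Int) (a : Int) :
    bestF (b :: bs) a = max (pyGcd a b) (bestF bs a) := by
  show bs.foldl _ (max 0 (pyGcd a b)) = _
  rw [max_comm, foldl_max_init]; rfl

theorem inner_fold (B : List Int) (a i : Int) : ∀ (acc : Int × Int), 0 ≤ acc.1 →
    B.foldl (fun (acc : Int × Int) b =>
      let g := pyGcd a b
      if acc.1 < g then (g, i) else acc) acc
    = if acc.1 < bestF B a then (bestF B a, i) else acc := by
  induction B with
  | nil =>
    intro acc h
    rw [if_neg (by simp [bestF]; omega)]
    rfl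
  | cons b bs ih =>
    intro acc h
    rw [List.foldl_cons, bestF_cons]
    set g := pyGcd a b with hg
    set Mb := bestF bs a with hMb
    have hg0 : 0 ≤ g := pyGcd_nonneg a b
    have hMb0 : 0 ≤ Mb := by
      rw [hMb, show bestF bs a = (bs.map (pyGcd a)).foldl max 0 by simp [bestF, List.foldl_map]]
      exact (PySem.List.le_foldl_max _ _).1
    by_cases hgb : acc.1 < g
    · simp only [hgb, if_pos]
      rw [ih (g, i) hg0]
      by_cases hc : g < Mb
      · rw [if_pos (by simp; omega), if_pos (by omega), max_eq_right hc.le]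
      · rw [if_neg (by simp; omega), if_pos (by omega), max_eq_left (by omega)]
    · rw [if_neg hgb, ih acc h]
      rw [not_lt] at hgb
      by_cases hc : acc.1 < Mb
      · rw [if_pos hc, if_pos (by rw [lt_max_iff]; omega), max_eq_right (by omega)]
      · rw [if_neg hc, if_neg (by rw [lt_max_iff]; omega)]

def selFold (vs : List Int) (k : Nat) (acc : Int × Int) : Int × Int :=
  match vs with
  | [] => acc
  | v :: t => selFold t (k + 1) (if acc.1 < v then (v, (k : Int)) else acc)

theorem outer_bridge (B : List Int) : ∀ (rs : List Int) (k : Nat) (acc : Int × Int), 0 ≤ acc.1 →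
    (List.range rs.length).foldl (fun acc i =>
      B.foldl (fun (acc : Int × Int) b =>
        let g := pyGcd (rs.getD i 0) b
        if acc.1 < g then (g, ((i + k : Nat) : Int)) else acc) acc) acc
    = selFold (rs.map (bestF B)) k acc := by
  intro rs
  induction rs with
  | nil => intro k acc h; rfl
  | cons r t ih =>
    intro k acc h
    rw [List.length_cons, List.range_succ_eq_map, List.foldl_cons, List.foldl_map]
    have h1 : (List.foldl (fun acc b =>
        let g := pyGcd ((r :: t).getD 0 0) b
        if acc.1 < g then (g, ((0 + k : Nat) : Int)) else acc) acc B)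
        = if acc.1 < bestF B r then (bestF B r, (k : Int)) else acc := by
      simpa using inner_fold B r (k : Int) acc h
    rw [h1]
    have h2 : (fun (acc : Int × Int) (i : Nat) =>
        B.foldl (fun (acc : Int × Int) b =>
          let g := pyGcd ((r :: t).getD i.succ 0) b
          if acc.1 < g then (g, ((i.succ + k : Nat) : Int)) else acc) acc)
        = (fun (acc : Int × Int) (i : Nat) =>
        B.foldl (fun (acc : Int × Int) b =>
          let g := pyGcd (t.getD i 0) b
          if acc.1 < g then (g, ((i + (k+1) : Nat) : Int)) else acc) acc) := by
      funext acc i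
      have : i.succ + k = i + (k + 1) := by omega
      simp [this]
    have hacc' : (0:Int) ≤ (if acc.1 < bestF B r then (bestF B r, (k:Int)) else acc).1 := by
      split
      · rw [show bestF B r = (B.map (pyGcd r)).foldl max 0 by simp [bestF, List.foldl_map]]
        exact (PySem.List.le_foldl_max _ _).1
      · exact h
    rw [h2, ih (k+1) _ hacc']
    rfl

theorem foldl_max_mem (t : List Int) (c : Int) : t.foldl max c = c ∨ t.foldl max c ∈ t := by
  induction t generalizing c with
  | nil => left; rfl
  | cons v s ih =>
    rcases ih (max c v) with h | h
    · rcases le_total c v with hcv | hcv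
      · right; rw [List.foldl_cons, h, max_eq_right hcv]; exact List.mem_cons_self ..
      · left; rw [List.foldl_cons, h]; exact max_eq_left hcv
    · right; exact List.mem_cons_of_mem _ h

theorem index?_getD_of_mem (t : List Int) (v : Int) (h : v ∈ t) :
    ∃ j, PySem.List.index? t v = some j := by
  cases e : PySem.List.index? t v with
  | some j => exact ⟨j, rfl⟩
  | none =>
    exfalso
    simp only [PySem.List.index?] at e
    exact absurd h (by simpa using List.idxOf?_eq_none_iff.mp e)

theorem selFold_spec : ∀ (vs : List Int) (k : Nat) (acc : Int × Int),
    selFold vs k acc =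
      if acc.1 < vs.foldl max acc.1
      then (vs.foldl max acc.1, ((k + (PySem.List.index? vs (vs.foldl max acc.1)).getD 0 : Nat) : Int))
      else acc := by
  intro vs
  induction vs with
  | nil => intro k acc; simp [selFold]
  | cons v t ih =>
    intro k acc
    rw [selFold, List.foldl_cons]
    by_cases h : acc.1 < v
    · rw [if_pos h, max_eq_right h.le, ih]
      dsimp only
      have hvle : v ≤ t.foldl max v := (PySem.List.le_foldl_max t v).1
      have hacc : acc.1 < t.foldl max v := by omega
      rw [if_pos hacc]
      by_cases hlt : v < t.foldl max v
      · rw [if_pos hlt]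
        have hmem : t.foldl max v ∈ t := by
          rcases foldl_max_mem t v with he | he
          · omega
          · exact he
        obtain ⟨j, hj⟩ := index?_getD_of_mem t _ hmem
        have hne : ¬ (v = t.foldl max v) := by omega
        simp only [PySem.List.index?] at hj ⊢
        rw [List.idxOf?_cons, if_neg (by simpa using hne), hj]
        simp only [Option.map_some, Option.getD_some]
        congr 1
        omega
      · have hveq : t.foldl max v = v := by omega
        rw [if_neg hlt, hveq]
        simp [PySem.List.index?, List.idxOf?_cons]
    · rw [if_neg h, ih, max_eq_left (by omega)]
      by_cases hlt : acc.1 < t.foldl max acc.1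
      · rw [if_pos hlt, if_pos hlt]
        have hmem : t.foldl max acc.1 ∈ t := by
          rcases foldl_max_mem t acc.1 with he | he
          · omega
          · exact he
        obtain ⟨j, hj⟩ := index?_getD_of_mem t _ hmem
        have hne : ¬ (v = t.foldl max acc.1) := by omega
        simp only [PySem.List.index?] at hj ⊢
        rw [List.idxOf?_cons, if_neg (by simpa using hne), hj]
        simp only [Option.map_some, Option.getD_some]
        congr 1
        omega
      · rw [if_neg hlt, if_neg hlt]

theorem aLoop_cons (a : Int) (rs B : List Int) (score : Int) {x : Int} {rem' : List Int}
    (h : PySem.List.pop? (a::rs) (aStep (a::rs) B).2 = some (x, rem')) :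
    aLoop (a::rs) B score = aLoop rem' (B ++ [x]) (score + (aStep (a::rs) B).1) := by
  rw [aLoop.eq_def]
  split
  · rename_i heq; exact absurd heq (by simp)
  · rename_i v r heq
    injection heq with h1 h2
    subst h1; subst h2
    dsimp only
    split
    · rename_i heq2; rw [h] at heq2; cases heq2
    · rename_i r2 heq2; rw [h] at heq2; cases heq2; rfl

theorem bLoop_cons (a : Int) (rs best : List Int) (score : Int) {x : Int} {rem' : List Int}
    (h : PySem.List.pop? (a::rs) (((PySem.List.index? best ((PySem.List.max? best (fun v => v)).getD 0)).getD 0 : Nat) : Int) = some (x, rem')) :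
    bLoop (a::rs) best score =
      bLoop rem' (bUpdate rem' (((PySem.List.pop? best (((PySem.List.index? best ((PySem.List.max? best (fun v => v)).getD 0)).getD 0 : Nat) : Int)).map Prod.snd).getD []) x) (score + (PySem.List.max? best (fun v => v)).getD 0) := by
  rw [bLoop.eq_def]
  split
  · rename_i heq; exact absurd heq (by simp)
  · rename_i v r heq
    injection heq with h1 h2
    subst h1; subst h2
    dsimp only
    split
    · rename_i heq2; rw [h] at heq2; cases heq2
    · rename_i r2 heq2; rw [h] at heq2; cases heq2; rfl

theorem max?_cons_getD (b : Int) (bs : List Int) :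
    (PySem.List.max? (b :: bs) (fun v => v)).getD 0 = bs.foldl max b := by
  rw [PySem.List.max?_id_cons]; rfl

theorem zipWith_self_map (f : Int → Int → Int) (l : List Int) :
    List.zipWith f l l = l.map (fun a => f a a) := by
  induction l with | nil => rfl | cons a t ih => simpa using ih

theorem bUpdate_map (B : List Int) (x : Int) (l : List Int) :
    bUpdate l (l.map (bestF B)) x = l.map (bestF (B ++ [x])) := by
  unfold bUpdate
  rw [List.zipWith_map_right, zipWith_self_map]
  apply List.map_congr_left
  intro r _
  show (if bestF B r < pyGcd r x then pyGcd r x else bestF B r) = bestF (B ++ [x]) r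
  rw [show bestF (B ++ [x]) r = max (bestF B r) (pyGcd r x) by simp [bestF, List.foldl_append]]
  rcases lt_or_ge (bestF B r) (pyGcd r x) with hc | hc
  · rw [if_pos hc, max_eq_right hc.le]
  · rw [if_neg (by omega), max_eq_left hc]

theorem aStep_eq (rem B : List Int) :
    aStep rem B = selFold (rem.map (bestF B)) 0 (0, -1) :=
  outer_bridge B rem 0 (0, -1) (by norm_num)

theorem bestF_eqz (B : List Int) (a : Int) : bestF B a = (B.map (pyGcd a)).foldl max 0 := by
  simp [bestF, List.foldl_map]

theorem bestF_nonneg (B : List Int) (a : Int) : 0 ≤ bestF B a := by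
  rw [bestF_eqz]; exact (PySem.List.le_foldl_max _ _).1

theorem bestF_zero_elem (B : List Int) (a : Int) (hB : B ≠ []) (h : bestF B a = 0) : a = 0 := by
  obtain ⟨b0, B', rfl⟩ := List.exists_cons_of_ne_nil hB
  have h1 : pyGcd a b0 ≤ bestF (b0 :: B') a := by
    rw [bestF_eqz]
    exact (PySem.List.le_foldl_max _ _).2 _ (List.mem_map_of_mem (List.mem_cons_self ..))
  have h2 : 0 ≤ pyGcd a b0 := pyGcd_nonneg a b0
  have h3 : pyGcd a b0 = 0 := by omega
  have h4 : Int.gcd a b0 = 0 := by unfold pyGcd at h3; exact_mod_cast h3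
  exact (Int.gcd_eq_zero_iff.mp h4).1

theorem loop_eq : ∀ (n : Nat) (rem B : List Int) (score : Int), rem.length = n → B ≠ [] →
    aLoop rem B score = bLoop rem (rem.map (bestF B)) score := by
  intro n
  induction n using Nat.strong_induction_on with
  | _ n ih =>
    intro rem B score hlen hB
    match rem with
    | [] => rw [aLoop.eq_def, bLoop.eq_def]
    | a :: rs =>
      have hlen' : rs.length < n := by simp at hlen; omega
      set best := (a :: rs).map (bestF B) with hbest
      set M := best.foldl max 0 with hM
      have hMnn : 0 ≤ M := (PySem.List.le_foldl_max _ _).1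
      have hentry : ∀ v ∈ best, 0 ≤ v := by
        intro v hv
        obtain ⟨r, _, rfl⟩ := List.mem_map.mp hv
        exact bestF_nonneg B r
      have hA : aStep (a :: rs) B =
          if (0:Int) < M then (M, (((PySem.List.index? best M).getD 0 : Nat) : Int)) else (0, -1) := by
        rw [aStep_eq, selFold_spec]
        simp only [← hbest, ← hM]
        split
        · simp
        · rfl
      have hb : best = bestF B a :: rs.map (bestF B) := by simp [hbest]
      have hg : (PySem.List.max? best (fun v => v)).getD 0 = M := by
        rw [hb, max?_cons_getD, hM, hb, List.foldl_cons, max_eq_right (bestF_nonneg B a)]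
      by_cases hpos : (0:Int) < M
      · -- the selected index is the first index of the maximum in best; both sides pop it
        have hMmem : M ∈ best := by
          rcases foldl_max_mem best 0 with he | he
          · omega
          · exact he
        obtain ⟨j, hj⟩ := index?_getD_of_mem best M hMmem
        obtain ⟨hjlt, -, -⟩ := PySem.List.getElem_of_index?_eq_some hj
        have hjr : j < (a :: rs).length := by simpa [hbest] using hjlt
        have hpopA : PySem.List.pop? (a :: rs) ((j : Nat) : Int) =
            some ((a :: rs)[j], (a :: rs).eraseIdx j) := PySem.List.pop?_natCast _ j hjr
        have hpopBst : PySem.List.pop? best ((j : Nat) : Int) =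
            some (best[j], best.eraseIdx j) := PySem.List.pop?_natCast _ j hjlt
        have hstep2 : (aStep (a :: rs) B).2 = ((j : Nat) : Int) := by rw [hA, if_pos hpos, hj]; rfl
        have hstep1 : (aStep (a :: rs) B).1 = M := by rw [hA, if_pos hpos]
        have hAL : aLoop (a :: rs) B score =
            aLoop ((a :: rs).eraseIdx j) (B ++ [(a :: rs)[j]]) (score + M) := by
          rw [aLoop_cons a rs B score (by rw [hstep2]; exact hpopA), hstep1]
        have hjB : ((PySem.List.index? best ((PySem.List.max? best (fun v => v)).getD 0)).getD 0 : Nat) = j := by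
          rw [hg, hj]; rfl
        have hBL : bLoop (a :: rs) best score =
            bLoop ((a :: rs).eraseIdx j)
              (bUpdate ((a :: rs).eraseIdx j) (best.eraseIdx j) ((a :: rs)[j]))
              (score + M) := by
          rw [bLoop_cons a rs best score (by rw [hjB]; exact hpopA)]
          rw [hjB, hpopBst, hg]
          rfl
        have herase : best.eraseIdx j = ((a :: rs).eraseIdx j).map (bestF B) := by
          rw [hbest, List.eraseIdx_map]
        rw [hAL, hBL, herase, bUpdate_map]
        have hlen2 : ((a :: rs).eraseIdx j).length < n := by
          rw [List.length_eraseIdx_of_lt hjr]; simp at hlen ⊢; omega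
        exact ih _ hlen2 _ _ _ rfl (by simp)
      · -- all gcds are 0, hence every element is 0: both sides pop a 0 and add 0
        have hM0 : M = 0 := by omega
        have hallb : ∀ v ∈ best, v = 0 := by
          intro v hv
          have h1 := (PySem.List.le_foldl_max best (0:Int)).2 v hv
          have h2 := hentry v hv
          omega
        have hall : ∀ r ∈ (a :: rs), r = 0 := by
          intro r hr
          exact bestF_zero_elem B r hB (hallb _ (List.mem_map_of_mem hr))
        have hpopA : PySem.List.pop? (a :: rs) (-1) =
            some ((a :: rs).getLast (by simp), (a :: rs).dropLast) := by
          conv_lhs => rw [← List.dropLast_append_getLast (show (a :: rs) ≠ [] by simp)]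
          exact PySem.List.pop?_last _ _
        have hstep2 : (aStep (a :: rs) B).2 = -1 := by rw [hA, if_neg hpos]
        have hstep1 : (aStep (a :: rs) B).1 = 0 := by rw [hA, if_neg hpos]
        have hAL : aLoop (a :: rs) B score =
            aLoop ((a :: rs).dropLast) (B ++ [(a :: rs).getLast (by simp)]) (score + 0) := by
          rw [aLoop_cons a rs B score (by rw [hstep2]; exact hpopA), hstep1]
        have hheadz : bestF B a = 0 := hallb _ (by simp [hbest])
        have hjB : ((PySem.List.index? best ((PySem.List.max? best (fun v => v)).getD 0)).getD 0 : Nat) = 0 := by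
          rw [hg, hM0]
          rw [hb, PySem.List.index?]
          simp [List.idxOf?_cons, hheadz]
        have hpopB : PySem.List.pop? (a :: rs) (((0:Nat)) : Int) = some (a, rs) := by
          exact PySem.List.pop?_natCast _ 0 (by simp)
        have hpopBst : PySem.List.pop? best (((0:Nat)) : Int) = some (bestF B a, rs.map (bestF B)) := by
          rw [hb]; exact PySem.List.pop?_natCast _ 0 (by simp)
        have hBL : bLoop (a :: rs) best score =
            bLoop rs (bUpdate rs (rs.map (bestF B)) a) (score + 0) := by
          rw [bLoop_cons a rs best score (by rw [hjB]; exact hpopB)]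
          rw [hjB, hpopBst, hg, hM0]
          rfl
        rw [hAL, hBL, bUpdate_map]
        -- both popped elements are 0, and both remainders are the same all-zero list
        have ha0 : a = 0 := hall a (List.mem_cons_self ..)
        have hlast0 : (a :: rs).getLast (by simp) = 0 := hall _ (List.getLast_mem _)
        have hrs : rs = List.replicate rs.length 0 := by
          have := List.eq_replicate_of_mem (fun b hb => hall b (List.mem_cons_of_mem _ hb))
          simpa using this
        have hdl : (a :: rs).dropLast = List.replicate rs.length 0 := by
          have h1 : ∀ b ∈ (a :: rs).dropLast, b = (0:Int) := fun b hb =>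
            hall b (List.dropLast_subset _ hb)
          have h2 : (a :: rs).dropLast.length = rs.length := by simp
          have := List.eq_replicate_of_mem h1
          rw [h2] at this
          simpa using this
        rw [hlast0, hdl, ha0, ← hrs]
        exact ih rs.length hlen' _ _ _ rfl (by simp)

-- ===== VERDICT (by name: the statement is the Claim_ definition above) =====
theorem max_gcd_score_spec : Claim_equal_max_gcd_score := by
  intro A _ hpre
  unfold Spec_max_gcd_score max_gcd_score max_gcd_score_alt
  have hs : PySem.List.sorted A (fun x => x) true ≠ [] := by
    simpa [PySem.List.sorted_eq_nil_iff] using hpre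
  cases h : PySem.List.sorted A (fun x => x) true with
  | nil => exact absurd h hs
  | cons a0 rest =>
    show aLoop rest [a0] 0 = bLoop rest (rest.map (fun r => pyGcd r a0)) 0
    have hmap : rest.map (fun r => pyGcd r a0) = rest.map (bestF [a0]) := by
      apply List.map_congr_left; intro r _
      simp [bestF, max_eq_right (pyGcd_nonneg r a0)]
    rw [hmap]
    exact loop_eq rest.length rest [a0] 0 rfl (by simp)
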